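-- pv_equiv track=rewrite | github.com/Purota/cp_algo | algo/binary_search/aggrcow.py | can_place_cows
-- ===== SOURCE A (Python) =====
-- def can_place_cows(A, C, d):
--     C -= 1 # First cow is automatically placed in the first stall
--     i = 1
--     last = 0
--     while C > 0:
--         if i >= len(A):
--             return False
--         if A[i] - A[last] >= d:
--             C -= 1
--             last = i
--         i += 1
--     return True
-- ===== SOURCE B (Python) =====
-- def can_place_cows(A, C, d):
--     n = len(A)
--     # stage 1: successor table: nxt[i] = first j > i with A[j] - A[i] >= d
--     nxt = {}
--     for i in range(n):
--         for j in range(i + 1, n):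
--             if A[j] - A[i] >= d:
--                 nxt[i] = j
--                 break
--     # stage 2: follow the successor chain from stall 0, counting placed cows
--     count = 1
--     cur = 0
--     while cur in nxt:
--         cur = nxt[cur]
--         count += 1
--     return count >= C
-- ===== Notes on version B (the rewrite author's own statement) =====
-- stated objective: alternative
-- what changed: B is a two-stage algorithm: it first precomputes a successor table nxt[i] = first stall j>i reachable with gap >= d (nested scan), then pointer-chases that table from stall 0 counting the cows placed and compares the total to C, instead of A's single stateful while-loop that decrements C with early exits.
import Mathlib
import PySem

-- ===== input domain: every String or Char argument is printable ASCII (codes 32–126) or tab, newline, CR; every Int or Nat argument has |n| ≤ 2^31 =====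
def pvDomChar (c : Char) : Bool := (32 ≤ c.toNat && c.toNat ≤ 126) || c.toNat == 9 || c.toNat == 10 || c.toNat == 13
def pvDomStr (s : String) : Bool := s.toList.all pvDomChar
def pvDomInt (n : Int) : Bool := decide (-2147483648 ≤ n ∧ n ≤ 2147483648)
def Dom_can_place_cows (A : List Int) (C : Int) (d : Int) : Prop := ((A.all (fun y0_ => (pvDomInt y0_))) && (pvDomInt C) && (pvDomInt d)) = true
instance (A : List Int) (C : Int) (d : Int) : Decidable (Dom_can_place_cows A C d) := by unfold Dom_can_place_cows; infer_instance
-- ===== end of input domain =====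

-- B is a two-stage algorithm: precompute a successor table (first stall j>i with gap >= d),
-- then pointer-chase it from stall 0 and compare the chain length to C (objective: alternative).

-- ===== PORT A =====
-- the while loop of A: state (C, i, last); terminates because i increases toward len(A)
def canPlaceLoop (A : List Int) (d : Int) (C : Int) (i last : Nat) : Bool :=
  if C > 0 then
    if A.length ≤ i then false
    else
      if (PySem.List.pyGet? A (i : Int)).getD 0 - (PySem.List.pyGet? A (last : Int)).getD 0 ≥ d then
        canPlaceLoop A d (C - 1) (i + 1) i
      else
        canPlaceLoop A d C (i + 1) last
  else true
termination_by A.length - i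

def can_place_cows (A : List Int) (C : Int) (d : Int) : Bool :=
  canPlaceLoop A d (C - 1) 1 0

-- ===== PORT B =====
-- inner for-loop with break of B's table build: first j in range(i+1, n) with A[j]-A[i] >= d
def findNext (A : List Int) (d : Int) (i j : Nat) : Option Nat :=
  if A.length ≤ j then none
  else if (PySem.List.pyGet? A (j : Int)).getD 0 - (PySem.List.pyGet? A (i : Int)).getD 0 ≥ d then
    some j
  else findNext A d i (j + 1)
termination_by A.length - j

-- stage 1 of B: the successor dict nxt
def buildNxt (A : List Int) (d : Int) : PySem.Dict Int Int :=
  (List.range A.length).foldl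
    (fun dct i =>
      match findNext A d i (i + 1) with
      | some j => dct.insert (i : Int) (j : Int)
      | none => dct)
    PySem.Dict.empty

-- stage 2 of B: the while loop following the chain; fuel = len(A) bounds the strictly
-- increasing chain of indices (totality guard only, never reached before the chain ends)
def chase (nxt : PySem.Dict Int Int) (cur count : Int) (fuel : Nat) : Int :=
  match fuel with
  | 0 => count
  | fuel + 1 =>
    match nxt.get? cur with
    | some j => chase nxt j (count + 1) fuel
    | none => count

def can_place_cows_alt (A : List Int) (C : Int) (d : Int) : Bool :=
  decide (chase (buildNxt A d) 0 1 A.length ≥ C)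

-- ===== PRECONDITION & SPEC =====
def Spec_can_place_cows (A : List Int) (C : Int) (d : Int) (out : Bool) : Prop := out = can_place_cows_alt A C d
instance (A : List Int) (C : Int) (d : Int) (out : Bool) : Decidable (Spec_can_place_cows A C d out) := by unfold Spec_can_place_cows; infer_instance

-- ===== CLAIM (what is proved, stated in full; the proofs are below) =====
def Claim_equal_can_place_cows : Prop := ∀ (A : List Int) (C : Int) (d : Int), Dom_can_place_cows A C d → Spec_can_place_cows A C d (can_place_cows A C d)

-- ===== LEMMAS AND PROOFS =====

-- number of additional cows the greedy placement puts from index i on, given the last placed index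
def gcount (A : List Int) (d : Int) (last i : Nat) : Int :=
  if A.length ≤ i then 0
  else
    if (PySem.List.pyGet? A (i : Int)).getD 0 - (PySem.List.pyGet? A (last : Int)).getD 0 ≥ d then
      1 + gcount A d i (i + 1)
    else
      gcount A d last (i + 1)
termination_by A.length - i

theorem gcount_nonneg (A : List Int) (d : Int) (last i : Nat) : 0 ≤ gcount A d last i := by
  induction hn : A.length - i using Nat.strong_induction_on generalizing last i with
  | _ n ih =>
    unfold gcount
    split
    · exact le_refl 0
    · rename_i h
      split
      · have := ih (A.length - (i+1)) (by omega) i (i+1) rfl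
        omega
      · exact ih (A.length - (i+1)) (by omega) last (i+1) rfl

theorem canPlaceLoop_eq (A : List Int) (d : Int) (C : Int) (i last : Nat) :
    canPlaceLoop A d C i last = decide (C ≤ gcount A d last i) := by
  induction hn : A.length - i using Nat.strong_induction_on generalizing C last i with
  | _ n ih =>
    unfold canPlaceLoop
    by_cases hC : C > 0
    · simp only [hC, if_true]
      by_cases hl : A.length ≤ i
      · simp only [hl, if_true]
        rw [gcount]
        simp [hl]
        omega
      · simp only [hl, if_false]
        rw [gcount]
        simp only [hl, if_false]
        split
        · rw [ih (A.length - (i+1)) (by omega) (C-1) (i+1) i rfl]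
          simp [decide_eq_decide]
          omega
        · exact ih (A.length - (i+1)) (by omega) C (i+1) last rfl
    · simp only [hC, if_false]
      have hg := gcount_nonneg A d last i
      simp
      omega

theorem findNext_bounds (A : List Int) (d : Int) (i j j' : Nat)
    (h : findNext A d i j = some j') : j ≤ j' ∧ j' < A.length := by
  induction hn : A.length - j using Nat.strong_induction_on generalizing j with
  | _ n ih =>
    rw [findNext] at h
    by_cases hl : A.length ≤ j
    · simp [hl] at h
    · simp only [hl, if_false] at h
      split at h
      · cases h; omega
      · have := ih (A.length - (j+1)) (by omega) (j+1) h rfl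
        omega

theorem gcount_findNext (A : List Int) (d : Int) (last j : Nat) :
    gcount A d last j =
      match findNext A d last j with
      | none => 0
      | some j' => 1 + gcount A d j' (j' + 1) := by
  induction hn : A.length - j using Nat.strong_induction_on generalizing j with
  | _ n ih =>
    rw [gcount, findNext]
    by_cases hl : A.length ≤ j
    · simp [hl]
    · simp only [hl, if_false]
      split
      · rfl
      · exact ih (A.length - (j+1)) (by omega) (j+1) rfl

theorem build_get (A : List Int) (d : Int) (r m : Nat) :
    (((List.range r).foldl
        (fun dct i =>
          match findNext A d i (i + 1) with
          | some j => dct.insert (i : Int) (j : Int)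
          | none => dct)
        PySem.Dict.empty).get? (m : Int)) =
      if m < r then (findNext A d m (m + 1)).map (fun j => (j : Int)) else none := by
  induction r with
  | zero => simp [PySem.Dict.get?_empty]
  | succ r ih =>
    rw [List.range_succ, List.foldl_append, List.foldl_cons, List.foldl_nil]
    by_cases hm : m = r
    · subst hm
      cases hf : findNext A d m (m + 1) with
      | none => simp [ih]
      | some j => simp [PySem.Dict.get?_insert_self]
    · have hne : (m : Int) ≠ (r : Int) := by exact_mod_cast hm
      have hlt : m < r + 1 ↔ m < r := by omega
      cases hf : findNext A d r (r + 1) with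
      | none =>
        simpa [hlt] using ih
      | some j =>
        simp only []
        rw [PySem.Dict.get?_insert_of_ne _ _ hne, ih]
        simp [hlt]

theorem buildNxt_get (A : List Int) (d : Int) (m : Nat) :
    (buildNxt A d).get? (m : Int) = (findNext A d m (m + 1)).map (fun j => (j : Int)) := by
  rw [buildNxt, build_get]
  split
  · rfl
  · rename_i h
    cases hf : findNext A d m (m + 1) with
    | none => rfl
    | some j =>
      have := findNext_bounds A d m (m+1) j hf
      omega

theorem chase_eq (A : List Int) (d : Int) (fuel : Nat) :
    ∀ (m : Nat) (c : Int), A.length ≤ m + fuel →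
      chase (buildNxt A d) (m : Int) c fuel = c + gcount A d m (m + 1) := by
  induction fuel with
  | zero =>
    intro m c h
    rw [chase, gcount]
    have : A.length ≤ m + 1 := by omega
    simp [this]
  | succ fuel ih =>
    intro m c h
    rw [chase, buildNxt_get]
    cases hf : findNext A d m (m + 1) with
    | none =>
      rw [gcount_findNext, hf]
      simp
    | some j =>
      have hb := findNext_bounds A d m (m+1) j hf
      show chase (buildNxt A d) ((j : Nat) : Int) (c + 1) fuel = c + gcount A d m (m + 1)
      rw [ih j (c + 1) (by omega), gcount_findNext A d m (m+1), hf]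
      ring

-- ===== VERDICT (by name: the statement is the Claim_ definition above) =====
theorem can_place_cows_spec : Claim_equal_can_place_cows := by
  intro A C d _
  unfold Spec_can_place_cows can_place_cows can_place_cows_alt
  rw [canPlaceLoop_eq]
  have hc := chase_eq A d A.length 0 1 (by omega)
  rw [show ((0 : Nat) : Int) = (0 : Int) from rfl] at hc
  rw [hc]
  simp only [decide_eq_decide]
  have h01 : gcount A d 0 1 = gcount A d 0 (0 + 1) := by norm_num
  rw [h01]
  omega
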